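-- pv_equiv track=rewrite | github.com/ishan090/Codewars_ProjectEuler | projectEuler/problem24.py | greedy_factorials
-- ===== SOURCE A (Python) =====
-- from math import factorial as f
--
-- def greedy_factorials(n, i):
--     """
--     Tries to obtain the number n from multiples of factorials of numbers i and below
--     E.g., 1000 = 6! + 2*5! + 4! + 2*3! + 2*2!
--     """
--     x = n
--     facts = {}
--     while x != 0:
--         if x < f(i):
--             i -= 1
--             continue
--         mult = x // f(i)
--         facts[i] = mult
--         x %= f(i)
--         i -= 1
--     return facts
-- ===== SOURCE B (Python) =====
-- def greedy_factorials(n, i):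
--     """
--     Tries to obtain the number n from multiples of factorials of numbers i and below
--     E.g., 1000 = 6! + 2*5! + 4! + 2*3! + 2*2!
--     """
--     facts = {}
--     if n == 0:
--         return facts
--     # bottom-up factorial-base (mixed-radix) conversion: repeatedly divmod by
--     # the increasing radixes 1, 2, 3, ...; the quotient left when we stop is
--     # the top coefficient; then emit the recorded digits top-down.
--     x = n
--     k = 0
--     digits = []
--     while k < i and x >= k + 1:
--         x, d = divmod(x, k + 1)
--         digits.append((k, d))
--         k += 1
--     facts[k] = x
--     for j, d in reversed(digits):
--         if d:
--             facts[j] = d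
--     return facts
-- ===== Notes on version B (the rewrite author's own statement) =====
-- stated objective: faster
-- what changed: B replaces A's top-down greedy loop (which recomputes factorial(i) from scratch at every level and scans idle levels one by one) by a bottom-up mixed-radix conversion: repeated divmod by the increasing radixes 1,2,3,... collects the low digits, the leftover quotient is the top coefficient, and the dict is then emitted back-to-front (top level first); correct because chained floor divisions give x = n // k! at level k, so the stripped digits are exactly A's remainders.
import Mathlib
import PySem

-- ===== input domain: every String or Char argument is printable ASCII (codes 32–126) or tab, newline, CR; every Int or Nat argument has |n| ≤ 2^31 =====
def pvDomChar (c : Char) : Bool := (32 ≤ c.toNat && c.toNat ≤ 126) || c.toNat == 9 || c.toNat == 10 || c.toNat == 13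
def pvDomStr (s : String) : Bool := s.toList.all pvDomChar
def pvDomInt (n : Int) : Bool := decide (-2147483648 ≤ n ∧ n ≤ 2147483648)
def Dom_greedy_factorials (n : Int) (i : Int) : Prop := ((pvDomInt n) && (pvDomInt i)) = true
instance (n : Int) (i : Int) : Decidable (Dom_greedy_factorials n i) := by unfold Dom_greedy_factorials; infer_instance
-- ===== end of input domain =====

-- B replaces A's top-down greedy (recomputing factorial(i) each level) by a bottom-up
-- mixed-radix conversion (divmod by 1,2,3,…) that emits the collected digits back-to-front;
-- objective: faster (no factorial is ever computed).
-- Where A raises ValueError (n<0, or n>0 with i<0) nothing is claimed (outside Pre_).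

-- ===== PORT A =====

-- math.factorial, exact for i ≥ 0 (Python raises ValueError for i < 0; such calls are outside Pre_)
def pyFact (i : Int) : Int := (Nat.factorial i.toNat : Int)

-- A's while-loop, state (x, i, facts); Python raises at f(i) with i < 0, there the port just stops
def goA (x : Int) (i : Int) (facts : PySem.Dict Int Int) : PySem.Dict Int Int :=
  if x = 0 then facts
  else if i < 0 then facts  -- Python: f(i) raises ValueError here (outside Pre_)
  else if x < pyFact i then goA x (i - 1) facts
  else goA (PySem.Int.mod x (pyFact i)) (i - 1)
           (facts.insert i (PySem.Int.floordiv x (pyFact i)))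
  termination_by (i + 1).toNat
  decreasing_by all_goals omega

def greedy_factorials (n : Int) (i : Int) : List (Int × Int) :=
  (goA n i PySem.Dict.empty).items

-- ===== PORT B =====

-- B's climb loop: while k < i and x >= k + 1: x, d = divmod(x, k + 1); digits.append((k, d)); k += 1
def altLoop (x : Int) (k : Int) (i : Int) (digits : List (Int × Int)) :
    Int × Int × List (Int × Int) :=
  if k < i ∧ k + 1 ≤ x then
    altLoop (PySem.Int.floordiv x (k + 1)) (k + 1) i
      (digits ++ [(k, PySem.Int.mod x (k + 1))])
  else (x, k, digits)
  termination_by (i - k).toNat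
  decreasing_by omega

-- facts[k] = x; for j, d in reversed(digits): if d: facts[j] = d
def greedy_factorials_alt (n : Int) (i : Int) : List (Int × Int) :=
  if n = 0 then (PySem.Dict.empty : PySem.Dict Int Int).items
  else
    let r := altLoop n 0 i []
    let d0 := (PySem.Dict.empty : PySem.Dict Int Int).insert r.2.1 r.1
    (r.2.2.reverse.foldl (fun d p => if p.2 ≠ 0 then d.insert p.1 p.2 else d) d0).items

-- ===== PRECONDITION & SPEC =====
-- Pre_ excludes exactly the inputs on which A raises ValueError (math.factorial of a
-- negative number): n < 0, or n > 0 with i < 0.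
def Pre_greedy_factorials (n : Int) (i : Int) : Prop := n = 0 ∨ (0 < n ∧ 0 ≤ i)
instance (n : Int) (i : Int) : Decidable (Pre_greedy_factorials n i) := by
  unfold Pre_greedy_factorials; infer_instance

def pvWitness_greedy_factorials : Int × Int := (1000, 10)

def Spec_greedy_factorials (n : Int) (i : Int) (out : List (Int × Int)) : Prop :=
  out = greedy_factorials_alt n i
instance (n : Int) (i : Int) (out : List (Int × Int)) : Decidable (Spec_greedy_factorials n i out) := by
  unfold Spec_greedy_factorials; infer_instance

-- ===== CLAIM (what is proved, stated in full; the proofs are below) =====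
def Claim_equal_greedy_factorials : Prop := ∀ (n : Int) (i : Int), Dom_greedy_factorials n i → Pre_greedy_factorials n i → Spec_greedy_factorials n i (greedy_factorials n i)

-- ===== LEMMAS AND PROOFS =====

theorem pyFact_pos (i : Int) : 0 < pyFact i := by
  unfold pyFact; exact_mod_cast Nat.factorial_pos i.toNat

theorem pyFact_zero : pyFact 0 = 1 := by decide

theorem pyFact_succ (k : Int) (hk : 0 ≤ k) : pyFact (k + 1) = pyFact k * (k + 1) := by
  unfold pyFact
  have h : (k + 1).toNat = k.toNat + 1 := by omega
  rw [h, Nat.factorial_succ]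
  push_cast
  have : ((k.toNat : Int)) = k := by omega
  rw [this]; ring

theorem pyFact_mono {a b : Int} (ha : 0 ≤ a) (hab : a ≤ b) : pyFact a ≤ pyFact b := by
  unfold pyFact
  exact_mod_cast Nat.factorial_le (by omega : a.toNat ≤ b.toNat)

theorem pyFact_dvd {a b : Int} (ha : 0 ≤ a) (hab : a ≤ b) : pyFact a ∣ pyFact b := by
  unfold pyFact
  exact_mod_cast Int.natCast_dvd_natCast.mpr
    (Nat.factorial_dvd_factorial (by omega : a.toNat ≤ b.toNat))

-- the "digit" kernel: one step of A at its own level k consumes d·k! entirely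
theorem goA_digit (k d : Int) (facts : PySem.Dict Int Int) (hk : 0 ≤ k) (hd : 0 ≤ d) :
    goA (d * pyFact k) k facts = if d = 0 then facts else facts.insert k d := by
  have hF : 0 < pyFact k := pyFact_pos k
  by_cases h0 : d = 0
  · rw [h0, goA]; simp
  · rw [if_neg h0, goA]
    have h1 : 1 ≤ d := by omega
    have hge : pyFact k ≤ d * pyFact k := by nlinarith
    rw [if_neg (by nlinarith : ¬ d * pyFact k = 0), if_neg (by omega : ¬ k < 0),
      if_neg (by omega : ¬ d * pyFact k < pyFact k)]
    have hmod : PySem.Int.mod (d * pyFact k) (pyFact k) = 0 := by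
      rw [PySem.Int.mod_eq_emod_of_pos hF, Int.mul_emod_left]
    have hdiv : PySem.Int.floordiv (d * pyFact k) (pyFact k) = d := by
      rw [PySem.Int.floordiv_eq_ediv_of_pos hF, Int.mul_ediv_cancel _ (by omega)]
    rw [hmod, hdiv, goA]; simp

-- A skips idle levels one by one: if x < m! for every m with k < m ≤ j, A from j equals A from k
theorem skipA (d : Nat) : ∀ (j k x : Int) (facts : PySem.Dict Int Int),
    (j - k).toNat = d → 0 ≤ k → k ≤ j → 0 < x →
    (∀ m : Int, k < m → m ≤ j → x < pyFact m) →
    goA x j facts = goA x k facts := by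
  induction d with
  | zero =>
    intro j k x facts hd hk hkj hx hb
    have hjk : j = k := by omega
    rw [hjk]
  | succ d ih =>
    intro j k x facts hd hk hkj hx hb
    have hjk : k < j := by omega
    rw [goA]
    simp only [if_neg (by omega : ¬ x = 0), if_neg (by omega : ¬ j < 0),
      if_pos (hb j hjk le_rfl)]
    exact ih (j - 1) k x facts (by omega) hk (by omega) hx
      (fun m h1 h2 => hb m h1 (by omega))

theorem goA_zero (i : Int) (facts : PySem.Dict Int Int) : goA 0 i facts = facts := by
  rw [goA]; simp

-- stripping the lowest digit: A on v + d·k! (with (k+1)! ∣ v, 0 ≤ d ≤ k) first runs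
-- exactly as A on v and then consumes d·k! at level k
theorem strip (m : Nat) : ∀ (j k v d : Int) (facts : PySem.Dict Int Int),
    (j - k).toNat = m → 0 ≤ k → k ≤ j → 0 ≤ v → 0 ≤ d → d ≤ k →
    pyFact (k + 1) ∣ v → (k < j ∨ v < pyFact (j + 1)) →
    goA (v + d * pyFact k) j facts = goA (d * pyFact k) k (goA v j facts) := by
  induction m using Nat.strong_induction_on with
  | _ m ih =>
    intro j k v d facts hm hk hkj hv hd hdk hdvd hj
    have hFk : 0 < pyFact k := pyFact_pos k
    have hFk1 : 0 < pyFact (k + 1) := pyFact_pos (k + 1)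
    have hFj : 0 < pyFact j := pyFact_pos j
    have hdlt : d * pyFact k < pyFact (k + 1) := by
      rw [pyFact_succ k hk]; nlinarith
    by_cases hjk : j = k
    · -- base: v < (k+1)! and (k+1)! ∣ v and 0 ≤ v force v = 0
      have hv0 : v = 0 := by
        rcases hj with h | h
        · omega
        · rw [hjk] at h
          rcases hdvd with ⟨c, hc⟩
          rcases lt_trichotomy c 0 with h1 | h1 | h1
          · nlinarith
          · rw [hc, h1, mul_zero]
          · have : pyFact (k + 1) ≤ v := by nlinarith
            omega
      rw [hv0, zero_add, goA_zero, hjk]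
    · have hkj' : k < j := by omega
      have hdvdj : pyFact (k + 1) ∣ pyFact j := pyFact_dvd (by omega) (by omega)
      by_cases hz : v + d * pyFact k = 0
      · -- v = 0 and d = 0
        have hv0 : v = 0 := by nlinarith
        have hd0 : d = 0 := by nlinarith
        simp [hz, hv0, hd0, goA_zero]
      · by_cases hlt : v + d * pyFact k < pyFact j
        · -- idle level for the sum; v too (v ≤ sum)
          have hvlt : v < pyFact j := by nlinarith
          have lhs : goA (v + d * pyFact k) j facts = goA (v + d * pyFact k) (j - 1) facts := by
            rw [goA]
            simp only [if_neg hz, if_neg (by omega : ¬ j < 0), if_pos hlt]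
          have rhs : goA v j facts = goA v (j - 1) facts := by
            by_cases hv0 : v = 0
            · rw [hv0, goA_zero, goA_zero]
            · rw [goA]
              simp only [if_neg hv0, if_neg (by omega : ¬ j < 0), if_pos hvlt]
          rw [lhs, rhs]
          exact ih (j - 1 - k).toNat (by omega) (j - 1) k v d facts rfl hk (by omega)
            hv hd hdk hdvd (by right; simpa using hvlt)
        · -- dividing level: v and the sum produce the same quotient; remainders differ by d·k!
          push_neg at hlt
          set r := v % pyFact j with hr
          have hr0 : 0 ≤ r := Int.emod_nonneg v (by omega)
          have hrlt : r < pyFact j := Int.emod_lt_of_pos v hFj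
          have hrdvd : pyFact (k + 1) ∣ r := by
            have : v - pyFact j * (v / pyFact j) = r := by
              rw [hr, Int.emod_def]
            rw [← this]
            exact dvd_sub hdvd (Dvd.dvd.mul_right hdvdj _)
          have hrsmall : r + d * pyFact k < pyFact j := by
            rcases hrdvd with ⟨c, hc⟩
            rcases hdvdj with ⟨e, he⟩
            have hc0 : 0 ≤ c := by nlinarith
            have hce : c < e := by nlinarith
            have : r ≤ pyFact j - pyFact (k + 1) := by
              rw [hc, he]; nlinarith
            omega
          have hq : v / pyFact j = (v + d * pyFact k) / pyFact j := by
            conv_rhs => rw [show v + d * pyFact k = (r + d * pyFact k) + pyFact j * (v / pyFact j) by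
              rw [hr, Int.emod_def]; ring]
            rw [Int.add_mul_ediv_left _ _ (by omega : pyFact j ≠ 0),
              Int.ediv_eq_zero_of_lt (add_nonneg hr0 (mul_nonneg hd (le_of_lt hFk))) hrsmall,
              zero_add]
          have hrem : (v + d * pyFact k) % pyFact j = r + d * pyFact k := by
            conv_lhs => rw [show v + d * pyFact k = (r + d * pyFact k) + pyFact j * (v / pyFact j) by
              rw [hr, Int.emod_def]; ring]
            rw [Int.add_mul_emod_self_left,
              Int.emod_eq_of_lt (add_nonneg hr0 (mul_nonneg hd (le_of_lt hFk))) hrsmall]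
          have hvge : pyFact j ≤ v := by
            by_contra hcon
            push_neg at hcon
            have : v % pyFact j = v := Int.emod_eq_of_lt hv hcon
            omega
          have lhs : goA (v + d * pyFact k) j facts =
              goA (r + d * pyFact k) (j - 1) (facts.insert j (v / pyFact j)) := by
            rw [goA]
            simp only [if_neg hz, if_neg (by omega : ¬ j < 0),
              if_neg (by omega : ¬ v + d * pyFact k < pyFact j)]
            rw [PySem.Int.mod_eq_emod_of_pos hFj, PySem.Int.floordiv_eq_ediv_of_pos hFj,
              hrem, ← hq]
          have rhs : goA v j facts = goA r (j - 1) (facts.insert j (v / pyFact j)) := by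
            rw [goA]
            simp only [if_neg (by omega : ¬ v = 0), if_neg (by omega : ¬ j < 0),
              if_neg (by omega : ¬ v < pyFact j)]
            rw [PySem.Int.mod_eq_emod_of_pos hFj, PySem.Int.floordiv_eq_ediv_of_pos hFj, ← hr]
          rw [lhs, rhs]
          exact ih (j - 1 - k).toNat (by omega) (j - 1) k r d _ rfl hk (by omega)
            hr0 hd hdk hrdvd (by right; simpa using hrlt)

-- the accumulator of B's loop is a pure append
theorem altLoop_acc (m : Nat) : ∀ (x k i : Int) (ds : List (Int × Int)),
    (i - k).toNat = m →
    altLoop x k i ds = ((altLoop x k i []).1, (altLoop x k i []).2.1,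
      ds ++ (altLoop x k i []).2.2) := by
  induction m using Nat.strong_induction_on with
  | _ m ih =>
    intro x k i ds hm
    by_cases hc : k < i ∧ k + 1 ≤ x
    · rw [altLoop, if_pos hc]
      conv_rhs => rw [altLoop, if_pos hc]
      simp only [List.nil_append]
      rw [ih (i - (k + 1)).toNat (by omega) _ (k + 1) i _ rfl,
        ih (i - (k + 1)).toNat (by omega) _ (k + 1) i [(k, PySem.Int.mod x (k + 1))] rfl]
      simp
    · rw [altLoop, if_neg hc]
      conv_rhs => rw [altLoop, if_neg hc]
      simp

-- main correspondence: A's run on x·k! from level i equals B's loop from (x, k)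
-- rendered back-to-front (top coefficient first, then the nonzero digits, descending)
theorem bmain (m : Nat) : ∀ (k x i : Int) (facts : PySem.Dict Int Int),
    (i - k).toNat = m → 0 ≤ k → k ≤ i → 0 < x →
    goA (x * pyFact k) i facts =
      (altLoop x k i []).2.2.reverse.foldl
        (fun d p => if p.2 ≠ 0 then d.insert p.1 p.2 else d)
        (facts.insert (altLoop x k i []).2.1 (altLoop x k i []).1) := by
  induction m using Nat.strong_induction_on with
  | _ m ih =>
    intro k x i facts hm hk hki hx
    have hFk : 0 < pyFact k := pyFact_pos k
    by_cases hc : k < i ∧ k + 1 ≤ x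
    · -- one more radix step in B; strip the lowest digit on A's side
      obtain ⟨hki', hxk⟩ := hc
      have hk1 : (0:Int) < k + 1 := by omega
      set x' := PySem.Int.floordiv x (k + 1) with hx'
      set r := PySem.Int.mod x (k + 1) with hrdef
      have hx'e : x' = x / (k + 1) := by rw [hx', PySem.Int.floordiv_eq_ediv_of_pos hk1]
      have hre : r = x % (k + 1) := by rw [hrdef, PySem.Int.mod_eq_emod_of_pos hk1]
      have hr0 : 0 ≤ r := by rw [hre]; exact Int.emod_nonneg x (by omega)
      have hrk : r ≤ k := by
        have := Int.emod_lt_of_pos x hk1; omega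
      have hx'1 : 1 ≤ x' := by
        rw [hx'e]; exact (Int.le_ediv_iff_mul_le hk1).mpr (by omega)
      have hsplit : x * pyFact k = x' * pyFact (k + 1) + r * pyFact k := by
        have : x = (k + 1) * x' + r := by rw [hx'e, hre, Int.emod_def]; ring
        rw [this, pyFact_succ k hk]; ring
      have hloop : altLoop x k i [] =
          ((altLoop x' (k + 1) i []).1, (altLoop x' (k + 1) i []).2.1,
            (k, r) :: (altLoop x' (k + 1) i []).2.2) := by
        rw [altLoop, if_pos ⟨hki', hxk⟩, ← hx', ← hrdef]
        simp only [List.nil_append]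
        rw [altLoop_acc (i - (k + 1)).toNat x' (k + 1) i [(k, r)] rfl]
        simp
      rw [hloop, hsplit]
      have hstrip := strip (i - k).toNat i k (x' * pyFact (k + 1)) r facts rfl hk
        (by omega) (by nlinarith [pyFact_pos (k + 1)]) hr0 hrk ⟨x', mul_comm x' _⟩
        (Or.inl hki')
      rw [hstrip,
        ih (i - (k + 1)).toNat (by omega) (k + 1) x' i facts rfl (by omega) (by omega)
          (by omega),
        goA_digit k r _ hk hr0]
      simp only [List.reverse_cons, List.foldl_append, List.foldl_cons, List.foldl_nil]
      by_cases hr : r = 0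
      · simp [hr]
      · simp [hr]
    · -- B's loop stops: (x, k, []); A idles down from i to k and consumes x·k! there
      rw [altLoop, if_neg hc]
      simp only [List.reverse_nil, List.foldl_nil]
      have hxk : x * pyFact k ≠ 0 := by nlinarith
      have hskip : goA (x * pyFact k) i facts = goA (x * pyFact k) k facts := by
        refine skipA (i - k).toNat i k (x * pyFact k) facts (by omega) hk hki
          (by nlinarith) ?_
        intro mm h1 h2
        have hxlt : x < k + 1 := by
          rcases not_and_or.mp hc with h | h
          · omega
          · omega
        have h3 : x * pyFact k < pyFact (k + 1) := by
          rw [pyFact_succ k hk]; nlinarith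
        exact lt_of_lt_of_le h3 (pyFact_mono (by omega) (by omega))
      rw [hskip, goA_digit k x facts hk (by omega), if_neg (by omega)]

-- ===== VERDICT (by name: the statement is the Claim_ definition above) =====
theorem greedy_factorials_spec : Claim_equal_greedy_factorials := by
  intro n i _ hpre
  unfold Spec_greedy_factorials greedy_factorials greedy_factorials_alt
  rcases hpre with h0 | ⟨hn, hi⟩
  · rw [h0, if_pos rfl, goA_zero]
  · rw [if_neg (by omega)]
    have := bmain i.toNat 0 n i PySem.Dict.empty (by omega) le_rfl hi hn
    rw [pyFact_zero, mul_one] at this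
    simp only [this]
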